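-- pv_equiv track=rewrite | github.com/paiml/depyler | examples/hard_puzzle_pascals.py | pascal_diagonal
-- ===== SOURCE A (Python) =====
-- def pascal_row(n: int) -> list[int]:
--     row: list[int] = [1]
--     i: int = 1
--     while i <= n:
--         prev: int = row[i - 1]
--         val: int = prev * (n - i + 1) // i
--         row.append(val)
--         i = i + 1
--     return row
--
-- def pascal_element(row: int, col: int) -> int:
--     if col < 0 or col > row:
--         return 0
--     if col == 0 or col == row:
--         return 1
--     r: list[int] = pascal_row(row)
--     return r[col]
--
-- def pascal_diagonal(n: int, diag: int) -> list[int]: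
--     result: list[int] = []
--     i: int = 0
--     while i < n:
--         row: int = diag + i
--         pe: int = pascal_element(row, diag)
--         result.append(pe)
--         i = i + 1
--     return result
-- ===== SOURCE B (Python) =====
-- def pascal_diagonal(n: int, diag: int) -> list[int]:
--     if diag < 0:
--         return [0] * max(n, 0)
--     result: list[int] = []
--     c: int = 1
--     for i in range(n):
--         result.append(c)
--         c = c * (diag + i + 1) // (i + 1)
--     return result
-- ===== Notes on version B (the rewrite author's own statement) =====
-- stated objective: faster
-- what changed: Instead of rebuilding the whole Pascal row of length diag+i for every i, B maintains a single running binomial coefficient and updates it in O(1) per step via C(diag+i+1,diag)=C(diag+i,diag)*(diag+i+1)//(i+1).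
import Mathlib
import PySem

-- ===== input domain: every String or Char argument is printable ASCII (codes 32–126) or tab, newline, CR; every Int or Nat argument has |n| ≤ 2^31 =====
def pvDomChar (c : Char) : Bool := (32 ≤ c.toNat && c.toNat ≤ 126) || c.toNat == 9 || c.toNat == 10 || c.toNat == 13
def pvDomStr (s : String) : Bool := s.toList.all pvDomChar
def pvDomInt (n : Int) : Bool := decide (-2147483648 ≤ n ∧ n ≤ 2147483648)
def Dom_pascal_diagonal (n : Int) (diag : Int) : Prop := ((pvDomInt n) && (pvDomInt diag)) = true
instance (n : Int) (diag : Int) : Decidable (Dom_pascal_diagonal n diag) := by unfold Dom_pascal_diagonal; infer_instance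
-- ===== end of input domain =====

-- B replaces A's per-element rebuild of a whole Pascal row by a single running
-- binomial coefficient updated in O(1) per step (objective: faster, asymptotic).

-- ===== PORT A =====
-- while-loop of pascal_row: i runs from 1 while i <= n.
-- row[i-1] is always in range on reached calls, so the .getD 0 default is unreachable.
def pascalRowAux (n : Int) (i : Int) (row : List Int) : List Int :=
  if _h : i ≤ n then
    -- prev := row[i-1]; val := prev * (n - i + 1) // i (inlined)
    pascalRowAux n (i + 1)
      (row ++ [PySem.Int.floordiv (PySem.List.pyGetD row (i - 1) 0 * (n - i + 1)) i])
  else row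
termination_by (n + 1 - i).toNat
decreasing_by omega

def pascal_row (n : Int) : List Int := pascalRowAux n 1 [1]

-- r[col] is always in range when this branch is reached, so .getD 0 is unreachable.
def pascal_element (row : Int) (col : Int) : Int :=
  if col < 0 ∨ col > row then 0
  else if col = 0 ∨ col = row then 1
  else PySem.List.pyGetD (pascal_row row) col 0

def pascalDiagAux (n : Int) (diag : Int) (i : Int) (result : List Int) : List Int :=
  if _h : i < n then
    pascalDiagAux n diag (i + 1) (result ++ [pascal_element (diag + i) diag])
  else result
termination_by (n - i).toNat
decreasing_by omega

def pascal_diagonal (n : Int) (diag : Int) : List Int := pascalDiagAux n diag 0 []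

-- ===== PORT B =====
def pascal_diagonal_alt (n : Int) (diag : Int) : List Int :=
  if diag < 0 then PySem.List.pyRepeat [0] (max n 0)
  else ((PySem.List.pyRange 0 n 1).foldl
      (fun (st : List Int × Int) i =>
        (st.1 ++ [st.2], PySem.Int.floordiv (st.2 * (diag + i + 1)) (i + 1)))
      ([], 1)).1

-- ===== PRECONDITION & SPEC =====
def Spec_pascal_diagonal (n : Int) (diag : Int) (out : List Int) : Prop := out = pascal_diagonal_alt n diag
instance (n : Int) (diag : Int) (out : List Int) : Decidable (Spec_pascal_diagonal n diag out) := by unfold Spec_pascal_diagonal; infer_instance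

-- ===== CLAIM (what is proved, stated in full; the proofs are below) =====
def Claim_equal_pascal_diagonal : Prop := ∀ (n : Int) (diag : Int), Dom_pascal_diagonal n diag → Spec_pascal_diagonal n diag (pascal_diagonal n diag)

-- ===== LEMMAS AND PROOFS =====

-- A's pascal_row computes the binomial row.
lemma pascalRowAux_eq (m : Nat) : ∀ (j : Nat), 1 ≤ j → j ≤ m + 1 →
    pascalRowAux (m : Int) (j : Int) ((List.range j).map (fun k => (m.choose k : Int)))
      = (List.range (m + 1)).map (fun k => (m.choose k : Int)) := by
  intro j h1 h2
  induction hk : m + 1 - j generalizing j with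
  | zero =>
    have hj : j = m + 1 := by omega
    rw [pascalRowAux, dif_neg (by omega), hj]
  | succ t ih =>
    have hjm : (j : Int) ≤ (m : Int) := by exact_mod_cast (by omega : j ≤ m)
    rw [pascalRowAux, dif_pos hjm]
    have hprev : PySem.List.pyGetD ((List.range j).map (fun k => (m.choose k : Int))) ((j : Int) - 1) 0
        = (m.choose (j - 1) : Int) := by
      have : ((j : Int) - 1) = ((j - 1 : Nat) : Int) := by omega
      rw [this, PySem.List.pyGetD_natCast]
      simp [List.getD, List.getElem?_map, List.getElem?_range (show j - 1 < j by omega)]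
    rw [hprev]
    have harith : (m.choose (j - 1) : Int) * ((m : Int) - (j : Int) + 1)
        = ((m.choose j * j : Nat) : Int) := by
      have hid : m.choose (j - 1) * (m - (j - 1)) = m.choose j * j := by
        have := Nat.choose_succ_right_eq m (j - 1)
        have hjj : j - 1 + 1 = j := by omega
        rw [hjj] at this
        omega
      have hcast : ((m : Int) - (j : Int) + 1) = ((m - (j - 1) : Nat) : Int) := by omega
      rw [hcast]
      push_cast [← hid]
      ring
    rw [harith]
    have hdiv : PySem.Int.floordiv ((m.choose j * j : Nat) : Int) (j : Int)
        = (m.choose j : Int) := by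
      rw [PySem.Int.floordiv_natCast, Nat.mul_div_cancel _ (by omega : 0 < j)]
    rw [hdiv]
    have hrow : (List.range j).map (fun k => (m.choose k : Int)) ++ [(m.choose j : Int)]
        = (List.range (j + 1)).map (fun k => (m.choose k : Int)) := by
      rw [List.range_succ, List.map_append]; simp
    have hj1 : ((j : Int) + 1) = ((j + 1 : Nat) : Int) := by push_cast; ring
    rw [hrow, hj1]
    exact ih (j + 1) (by omega) (by omega) (by omega)

lemma pascal_row_eq (m : Nat) :
    pascal_row (m : Int) = (List.range (m + 1)).map (fun k => (m.choose k : Int)) := by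
  have h := pascalRowAux_eq m 1 (by omega) (by omega)
  simpa [pascal_row, List.range_succ] using h

-- A's pascal_element on the diagonal is the binomial coefficient.
lemma pascal_element_eq (d i : Nat) :
    pascal_element ((d : Int) + (i : Int)) (d : Int) = ((d + i).choose d : Int) := by
  unfold pascal_element
  have hcast : (d : Int) + (i : Int) = ((d + i : Nat) : Int) := by push_cast; ring
  rw [if_neg (by omega)]
  by_cases h0 : (d : Int) = 0 ∨ (d : Int) = (d : Int) + (i : Int)
  · rw [if_pos h0]
    rcases h0 with h | h
    · have : d = 0 := by exact_mod_cast h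
      simp [this]
    · have : i = 0 := by omega
      simp [this]
  · rw [if_neg h0, hcast, pascal_row_eq (d + i), PySem.List.pyGetD_natCast]
    have hd : d < d + i + 1 := by omega
    simp [List.getD, hd]

-- A's outer loop as a map over the range.
lemma pascalDiagAux_eq (n diag : Int) : ∀ (i : Int) (result : List Int),
    pascalDiagAux n diag i result
      = result ++ (PySem.List.pyRange i n 1).map (fun j => pascal_element (diag + j) diag) := by
  intro i result
  induction hk : (n - i).toNat generalizing i result with
  | zero =>
    rw [pascalDiagAux, dif_neg (by omega), PySem.List.pyRange_one_eq_nil (by omega)]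
    simp
  | succ t ih =>
    have hin : i < n := by omega
    rw [pascalDiagAux, dif_pos hin, ih (i + 1) _ (by omega),
      PySem.List.pyRange_one_cons hin]
    simp

-- B's fold as a map over the range.
lemma alt_foldl_eq (n : Int) (d : Nat) : ∀ (i : Nat) (acc : List Int),
    ((PySem.List.pyRange (i : Int) n 1).foldl
      (fun (st : List Int × Int) j =>
        (st.1 ++ [st.2], PySem.Int.floordiv (st.2 * ((d : Int) + j + 1)) (j + 1)))
      (acc, ((d + i).choose d : Int))).1
    = acc ++ (PySem.List.pyRange (i : Int) n 1).map (fun j => ((d + j.toNat).choose d : Int)) := by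
  intro i acc
  induction hk : (n - i).toNat generalizing i acc with
  | zero =>
    rw [PySem.List.pyRange_one_eq_nil (by omega)]
    simp
  | succ t ih =>
    have hin : (i : Int) < n := by omega
    rw [PySem.List.pyRange_one_cons hin]
    simp only [List.foldl_cons, List.map_cons]
    have hnext : PySem.Int.floordiv (((d + i).choose d : Int) * ((d : Int) + (i : Int) + 1)) ((i : Int) + 1)
        = ((d + (i + 1)).choose d : Int) := by
      have hid : (d + i).choose d * (d + i + 1) = (d + i + 1).choose d * (i + 1) := by
        have h := Nat.choose_mul_succ_eq (d + i) d
        rw [show d + i + 1 - d = i + 1 by omega] at h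
        omega
      have h1 : ((d + i).choose d : Int) * ((d : Int) + (i : Int) + 1)
          = (((d + i + 1).choose d * (i + 1) : Nat) : Int) := by push_cast [← hid]; ring
      have h2 : ((i : Int) + 1) = ((i + 1 : Nat) : Int) := by push_cast; ring
      rw [h1, h2, PySem.Int.floordiv_natCast, Nat.mul_div_cancel _ (by omega : 0 < i + 1)]
      norm_num [show d + (i + 1) = d + i + 1 by omega]
    rw [hnext]
    have hcast : ((i : Int) + 1) = ((i + 1 : Nat) : Int) := by push_cast; ring
    rw [hcast, ih (i + 1) _ (by omega)]
    simp [show ((i : Int).toNat) = i by omega]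

lemma alt_foldl_zero (n : Int) (d : Nat) :
    ((PySem.List.pyRange 0 n 1).foldl
      (fun (st : List Int × Int) j =>
        (st.1 ++ [st.2], PySem.Int.floordiv (st.2 * ((d : Int) + j + 1)) (j + 1)))
      ([], 1)).1
    = (PySem.List.pyRange 0 n 1).map (fun j => ((d + j.toNat).choose d : Int)) := by
  simpa using alt_foldl_eq n d 0 []

-- ===== VERDICT (by name: the statement is the Claim_ definition above) =====
theorem pascal_diagonal_spec : Claim_equal_pascal_diagonal := by
  intro n diag _
  unfold Spec_pascal_diagonal pascal_diagonal pascal_diagonal_alt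
  rw [pascalDiagAux_eq n diag 0 []]
  by_cases hd : diag < 0
  · rw [if_pos hd, PySem.List.pyRepeat_singleton]
    have hmap : (PySem.List.pyRange 0 n 1).map (fun j => pascal_element (diag + j) diag)
        = List.replicate (PySem.List.pyRange 0 n 1).length 0 := by
      rw [List.eq_replicate_iff]
      refine ⟨by simp, ?_⟩
      intro b hb
      rcases List.mem_map.1 hb with ⟨j, _, rfl⟩
      unfold pascal_element
      rw [if_pos (Or.inl hd)]
    rw [hmap, PySem.List.length_pyRange_one]
    simp [show (max n 0).toNat = (n - 0).toNat by omega]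
  · rw [if_neg hd]
    obtain ⟨d, rfl⟩ : ∃ d : Nat, diag = (d : Int) := ⟨diag.toNat, by omega⟩
    rw [alt_foldl_zero n d, List.nil_append]
    apply List.map_congr_left
    intro j hj
    have hj0 : 0 ≤ j := ((PySem.List.mem_pyRange_one).1 (by exact_mod_cast hj)).1
    have hjc : j = ((j.toNat : Nat) : Int) := by omega
    rw [hjc, pascal_element_eq d j.toNat]
    norm_num
    congr 2
    omega
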